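-- pv_equiv track=rewrite | github.com/SomeOne768/TP_Secu_IOT | Chiffrement_payload-main/recherche_cle.py | lettre_possible_dico_par_index
-- ===== SOURCE A (Python) =====
-- def lettre_possible_dico_par_index(dico):
--     """
--     Pour eviter plusieurs parcours
--     """
--
--     i = 0
--     max = 0
--     possibility = []
--     for mot in dico:
--         for i in range(len(mot)):
--             if i>=max:
--                 possibility.append([mot[i]])
--                 max += 1
--             elif mot[i] not in possibility[i]:
--                 possibility[i].append(mot[i])
--
--     return possibility
-- ===== SOURCE B (Python) =====
-- def lettre_possible_dico_par_index(dico):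
--     width = max(map(len, dico), default=0)
--     return [list(dict.fromkeys(mot[j] for mot in dico if j < len(mot)))
--             for j in range(width)]
-- ===== Notes on version B (the rewrite author's own statement) =====
-- stated objective: idiomatic
-- what changed: B transposes the problem: it computes the max word length, then builds each column j directly (j-th char of every word long enough) and deduplicates it in first-appearance order, instead of A's row-major loop that grows and mutates per-index lists with an explicit running 'max' counter.
import Mathlib
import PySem

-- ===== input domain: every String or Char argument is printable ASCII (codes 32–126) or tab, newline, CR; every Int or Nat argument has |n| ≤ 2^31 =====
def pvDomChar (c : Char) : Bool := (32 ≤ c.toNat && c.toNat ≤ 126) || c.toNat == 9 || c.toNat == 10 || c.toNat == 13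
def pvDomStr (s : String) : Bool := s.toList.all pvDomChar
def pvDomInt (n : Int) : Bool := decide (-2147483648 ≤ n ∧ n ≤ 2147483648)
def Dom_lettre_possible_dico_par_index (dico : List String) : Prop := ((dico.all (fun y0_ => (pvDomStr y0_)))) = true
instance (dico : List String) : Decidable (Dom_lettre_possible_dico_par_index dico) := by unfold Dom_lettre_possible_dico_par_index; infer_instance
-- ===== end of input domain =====

-- B replaces A's stateful row-major column growth by an idiomatic column-major comprehension
-- (transpose by index, then ordered dedup per column); same return value, similar cost.

-- ===== PORT A =====
-- the loop body of A's inner `for i in range(len(mot))`, on state (max, possibility)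
def pvBodyA (w : List Char) (st : Nat × List (List String)) (i : Nat) : Nat × List (List String) :=
  let c := String.ofList [w.getD i ' ']          -- mot[i]; i is always in range here
  if st.1 ≤ i then (st.1 + 1, st.2 ++ [[c]])                -- i >= max: append [mot[i]], max += 1
  else if c ∈ st.2.getD i [] then st                        -- mot[i] in possibility[i]: nothing
  else (st.1, st.2.set i (st.2.getD i [] ++ [c]))           -- possibility[i].append(mot[i])

def lettre_possible_dico_par_index (dico : List String) : List (List String) :=
  (dico.foldl
    (fun st mot => (List.range mot.toList.length).foldl (pvBodyA mot.toList) st)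
    ((0 : Nat), ([] : List (List String)))).2

-- ===== PORT B =====
-- column j: the j-th character of every word long enough, in word order
def pvCol (dico : List String) (j : Nat) : List String :=
  dico.filterMap (fun mot =>
    if j < mot.toList.length then some (String.ofList [mot.toList.getD j ' ']) else none)

def lettre_possible_dico_par_index_alt (dico : List String) : List (List String) :=
  let width := dico.foldl (fun acc mot => max acc mot.toList.length) 0   -- max(map(len, dico), default=0)
  (List.range width).map (fun j => PySem.List.dedup (pvCol dico j))      -- list(dict.fromkeys(column j))

-- ===== PRECONDITION & SPEC =====
def Spec_lettre_possible_dico_par_index (dico : List String) (out : List (List String)) : Prop := out = lettre_possible_dico_par_index_alt dico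
instance (dico : List String) (out : List (List String)) : Decidable (Spec_lettre_possible_dico_par_index dico out) := by unfold Spec_lettre_possible_dico_par_index; infer_instance

-- ===== CLAIM (what is proved, stated in full; the proofs are below) =====
def Claim_equal_lettre_possible_dico_par_index : Prop := ∀ (dico : List String), Dom_lettre_possible_dico_par_index dico → Spec_lettre_possible_dico_par_index dico (lettre_possible_dico_par_index dico)

-- ===== LEMMAS AND PROOFS =====

-- positional description of what processing one word does to the column lists
def pvWstep : List (List String) → List Char → List (List String)
  | poss, [] => poss
  | [], c :: cs => [String.ofList [c]] :: pvWstep [] cs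
  | l :: ls, c :: cs => PySem.Set.add l (String.ofList [c]) :: pvWstep ls cs

def pvWfold (P : List (List String)) (ws : List String) : List (List String) :=
  ws.foldl (fun p m => pvWstep p m.toList) P

def pvWidth (ws : List String) : Nat := ws.foldl (fun acc mot => max acc mot.toList.length) 0

def pvAlt (ws : List String) : List (List String) :=
  (List.range (pvWidth ws)).map (fun j => PySem.List.dedup (pvCol ws j))

theorem pvAlt_def (ws : List String) : lettre_possible_dico_par_index_alt ws = pvAlt ws := rfl

theorem set_append_cons {α : Type} (pre : List α) (l x : α) (ls : List α) :
    (pre ++ l :: ls).set pre.length x = pre ++ x :: ls := by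
  induction pre with
  | nil => rfl
  | cons a t ih => simp [ih]

theorem dedup_snoc (l : List String) (c : String) :
    PySem.List.dedup (l ++ [c]) = PySem.Set.add (PySem.List.dedup l) c := by
  simp [PySem.List.dedup, PySem.Set.ofList, List.foldl_append]

theorem width_snoc (ws : List String) (m : String) :
    pvWidth (ws ++ [m]) = max (pvWidth ws) m.toList.length := by
  simp [pvWidth, List.foldl_append]

theorem col_snoc (ws : List String) (m : String) (j : Nat) :
    pvCol (ws ++ [m]) j =
      pvCol ws j ++ (if j < m.toList.length then [String.ofList [m.toList.getD j ' ']] else []) := by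
  by_cases h : j < m.toList.length <;> simp_all [pvCol, List.filterMap_append]

theorem col_nil_of_width_le (ws : List String) (j : Nat) (h : pvWidth ws ≤ j) :
    pvCol ws j = [] := by
  rw [pvCol, List.filterMap_eq_nil_iff]
  intro m hm
  have := (PySem.List.le_foldl_max_nat ws (fun mot => mot.toList.length) 0).2 m hm
  rw [pvWidth] at h
  rw [if_neg]
  omega

theorem getD_range_map' {β : Type} (f : Nat → β) (m i : Nat) (d : β) :
    ((List.range m).map f).getD i d = if i < m then f i else d := by
  split
  · exact PySem.List.getD_map_range f m i d ‹_›
  · apply List.getD_eq_default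
    simpa using by omega

-- characterisation of pvWstep as a map over column indices
theorem wstep_eq (cs : List Char) : ∀ (P : List (List String)),
    pvWstep P cs = (List.range (max P.length cs.length)).map
      (fun j => if j < cs.length
                then PySem.Set.add (P.getD j []) (String.ofList [cs.getD j ' '])
                else P.getD j []) := by
  induction cs with
  | nil =>
    intro P
    have h1 : pvWstep P [] = P := by cases P <;> rfl
    rw [h1]
    simp only [List.length_nil, Nat.max_zero, Nat.not_lt_zero, if_false]
    refine (List.ext_getElem (by simp) ?_).symm
    intro i h1 h2
    simp only [List.getElem_map, List.getElem_range]
    exact List.getD_eq_getElem P [] (by simpa using h1)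
  | cons c cs ih =>
    intro P
    match P with
    | [] =>
      rw [pvWstep, ih []]
      simp only [List.length_nil, Nat.zero_max, List.length_cons,
        List.range_succ_eq_map, List.map_cons, List.map_map]
      refine congrArg₂ List.cons ?_ ?_
      · simp [PySem.Set.add]
      · apply List.map_congr_left
        intro j hj
        rw [List.mem_range] at hj
        simp [Function.comp, hj]
    | l :: ls =>
      rw [pvWstep, ih ls]
      have hmax : max (l :: ls).length (c :: cs).length = max ls.length cs.length + 1 := by
        simp [Nat.succ_max_succ]
      rw [hmax]
      simp only [List.range_succ_eq_map, List.map_cons, List.map_map]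
      refine congrArg₂ List.cons ?_ ?_
      · simp
      · apply List.map_congr_left
        intro j hj
        simp [Function.comp]

-- B, seen as a left fold of pvWstep over the words
theorem alt_snoc (ws : List String) (m : String) :
    pvAlt (ws ++ [m]) = pvWstep (pvAlt ws) m.toList := by
  rw [wstep_eq]
  have hlen : (pvAlt ws).length = pvWidth ws := by simp [pvAlt]
  rw [pvAlt, width_snoc, hlen]
  apply List.map_congr_left
  intro j hj
  rw [List.mem_range] at hj
  rw [col_snoc]
  have hgetD : (pvAlt ws).getD j [] =
      if j < pvWidth ws then PySem.List.dedup (pvCol ws j) else [] := by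
    simpa [pvAlt] using getD_range_map' (fun j => PySem.List.dedup (pvCol ws j)) (pvWidth ws) j []
  by_cases hm : j < m.toList.length
  · rw [if_pos hm, if_pos hm, dedup_snoc, hgetD]
    by_cases hw : j < pvWidth ws
    · rw [if_pos hw]
    · rw [if_neg hw, col_nil_of_width_le ws j (by omega)]
      rfl
  · have hw : j < pvWidth ws := by omega
    rw [if_neg hm, if_neg hm, hgetD, if_pos hw, List.append_nil]

theorem alt_eq_wfold (ws : List String) : pvAlt ws = pvWfold [] ws := by
  induction ws using List.reverseRecOn with
  | nil => rfl
  | append_singleton ws m ih =>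
    rw [alt_snoc, ih]
    simp [pvWfold, List.foldl_append]

-- A's inner loop over range(len(mot)) acts positionally like pvWstep
theorem innerA (w : List Char) : ∀ (cs : List Char) (pre rest : List (List String)),
    w.drop pre.length = cs →
    (List.range' pre.length cs.length).foldl (pvBodyA w) ((pre ++ rest).length, pre ++ rest)
      = ((pre ++ pvWstep rest cs).length, pre ++ pvWstep rest cs) := by
  intro cs
  induction cs with
  | nil => intro pre rest _; simp [pvWstep]
  | cons c cs ih =>
    intro pre rest hdrop
    have hc : w[pre.length]? = some c := by
      rw [← List.head?_drop, hdrop]; rfl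
    have hdrop' : w.drop (pre.length + 1) = cs := by
      have h2 := congrArg (List.drop 1) hdrop
      rw [List.drop_drop] at h2
      simpa [Nat.add_comm] using h2
    rw [List.length_cons, List.range'_succ, List.foldl_cons]
    match rest with
    | [] =>
      have hstep : pvBodyA w ((pre ++ ([] : List (List String))).length, pre ++ []) pre.length
          = ((pre ++ [[String.ofList [c]]]).length, pre ++ [[String.ofList [c]]]) := by
        simp [pvBodyA, List.getD_eq_getElem?_getD, hc]
      rw [hstep]
      have hlen : (pre ++ [[String.ofList [c]]]).length = pre.length + 1 := by simp
      have := ih (pre ++ [[String.ofList [c]]]) [] (by rw [hlen]; exact hdrop')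
      rw [hlen] at this
      simp only [List.append_nil] at this
      rw [this, pvWstep]
      simp
    | l :: ls =>
      have hstep : pvBodyA w ((pre ++ l :: ls).length, pre ++ l :: ls) pre.length
          = ((pre ++ (PySem.Set.add l (String.ofList [c])) :: ls).length,
             pre ++ (PySem.Set.add l (String.ofList [c])) :: ls) := by
        have hlt : ¬ ((pre ++ l :: ls).length ≤ pre.length) := by simp
        simp only [pvBodyA, List.getD_eq_getElem?_getD, hc, if_neg hlt, set_append_cons]
        by_cases hmem : String.ofList [c] ∈ l
        · simp [hmem, PySem.Set.add]
        · simp [hmem, PySem.Set.add]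
      rw [hstep]
      have hlen : (pre ++ [PySem.Set.add l (String.ofList [c])]).length = pre.length + 1 := by simp
      have := ih (pre ++ [PySem.Set.add l (String.ofList [c])]) ls (by rw [hlen]; exact hdrop')
      rw [hlen] at this
      rw [show pre ++ [PySem.Set.add l (String.ofList [c])] ++ ls
            = pre ++ (PySem.Set.add l (String.ofList [c])) :: ls by simp,
          show (pre ++ [PySem.Set.add l (String.ofList [c])]) ++ pvWstep ls cs
            = pre ++ (PySem.Set.add l (String.ofList [c])) :: pvWstep ls cs by simp] at this
      rw [this, pvWstep]

theorem outerA (ws : List String) : ∀ (P : List (List String)),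
    ws.foldl (fun st mot => (List.range mot.toList.length).foldl (pvBodyA mot.toList) st)
        (P.length, P)
      = ((pvWfold P ws).length, pvWfold P ws) := by
  induction ws with
  | nil => intro P; rfl
  | cons m ws ih =>
    intro P
    rw [List.foldl_cons]
    have h := innerA m.toList m.toList [] P rfl
    simp only [List.nil_append, List.length_nil] at h
    rw [List.range_eq_range', h, ih (pvWstep P m.toList)]
    rfl

-- ===== VERDICT (by name: the statement is the Claim_ definition above) =====
theorem lettre_possible_dico_par_index_spec : Claim_equal_lettre_possible_dico_par_index := by
  intro dico _
  unfold Spec_lettre_possible_dico_par_index lettre_possible_dico_par_index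
  rw [show ((0 : Nat), ([] : List (List String)))
        = (([] : List (List String)).length, ([] : List (List String))) from rfl,
      outerA dico [], pvAlt_def, alt_eq_wfold]
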